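-- pv_equiv track=rewrite | github.com/drguilhermecapel/medai | backend/app/services/laboratory_exam_service.py | _gerar_orientacoes_preparo
-- ===== SOURCE A (Python) =====
-- def _gerar_orientacoes_preparo(exames: list) -> list:
--     """Gera orientações de preparo para os exames"""
--
--     orientacoes = []
--     nomes_exames = [exame.get('nome', '') for exame in exames]
--
--     if any(exame in nomes_exames for exame in ['glicemia_jejum', 'perfil_lipidico']):
--         orientacoes.append('Jejum de 12 horas necessário')
--
--     if 'cortisol' in nomes_exames:
--         orientacoes.append('Coleta preferencialmente entre 7h e 9h da manhã')
--
--     if any('cultura' in exame for exame in nomes_exames):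
--         orientacoes.append('Evitar uso de antibióticos nas últimas 48h')
--
--     if not orientacoes:
--         orientacoes.append('Não há preparo especial necessário')
--
--     return orientacoes
-- ===== SOURCE B (Python) =====
-- def _gerar_orientacoes_preparo(exames: list) -> list:
--     """Single pass over exames maintaining three flags, then emit fixed strings."""
--     jejum = cortisol = cultura = False
--     for exame in exames:
--         nome = exame.get('nome', '')
--         jejum = jejum or nome in ('glicemia_jejum', 'perfil_lipidico')
--         cortisol = cortisol or nome == 'cortisol'
--         cultura = cultura or 'cultura' in nome
--     orientacoes = []
--     if jejum:
--         orientacoes.append('Jejum de 12 horas necessário')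
--     if cortisol:
--         orientacoes.append('Coleta preferencialmente entre 7h e 9h da manhã')
--     if cultura:
--         orientacoes.append('Evitar uso de antibióticos nas últimas 48h')
--     return orientacoes or ['Não há preparo especial necessário']
-- ===== Notes on version B (the rewrite author's own statement) =====
-- stated objective: simpler
-- what changed: Replaces the intermediate name list plus three separate scans (two of them via any() generators) with one pass over exames that accumulates three boolean flags, then emits the fixed strings.
import Mathlib
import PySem

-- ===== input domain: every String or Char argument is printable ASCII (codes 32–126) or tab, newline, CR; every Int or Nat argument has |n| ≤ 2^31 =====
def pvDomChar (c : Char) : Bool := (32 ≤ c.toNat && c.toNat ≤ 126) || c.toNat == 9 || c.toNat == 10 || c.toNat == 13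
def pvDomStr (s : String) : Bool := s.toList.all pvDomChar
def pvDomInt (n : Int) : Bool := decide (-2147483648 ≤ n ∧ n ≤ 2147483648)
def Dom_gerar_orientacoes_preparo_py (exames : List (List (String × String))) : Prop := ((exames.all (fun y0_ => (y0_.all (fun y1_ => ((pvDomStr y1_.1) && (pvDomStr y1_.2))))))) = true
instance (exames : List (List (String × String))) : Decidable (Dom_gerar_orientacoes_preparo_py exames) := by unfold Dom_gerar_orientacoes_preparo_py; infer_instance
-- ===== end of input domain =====

-- B replaces A's name-list plus three separate scans by one pass over `exames`
-- maintaining three boolean flags (objective: simpler); return values proved equal.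

-- ===== PORT A =====
def gerar_orientacoes_preparo_py (exames : List (List (String × String))) : List String :=
  let orientacoes : List String := []
  let nomes_exames := exames.map (fun exame => PySem.Dict.getD (PySem.Dict.mk exame) "nome" "")
  let orientacoes :=
    if (["glicemia_jejum", "perfil_lipidico"].any (fun exame => nomes_exames.contains exame)) then
      orientacoes ++ ["Jejum de 12 horas necessário"]
    else orientacoes
  let orientacoes :=
    if nomes_exames.contains "cortisol" then
      orientacoes ++ ["Coleta preferencialmente entre 7h e 9h da manhã"]
    else orientacoes
  let orientacoes :=
    if (nomes_exames.any (fun exame => PySem.Str.isIn "cultura" exame)) then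
      orientacoes ++ ["Evitar uso de antibióticos nas últimas 48h"]
    else orientacoes
  let orientacoes :=
    if orientacoes.isEmpty then
      orientacoes ++ ["Não há preparo especial necessário"]
    else orientacoes
  orientacoes

-- ===== PORT B =====
def gerar_orientacoes_preparo_py_alt (exames : List (List (String × String))) : List String :=
  let flags := exames.foldl
    (fun (f : Bool × Bool × Bool) exame =>
      let nome := PySem.Dict.getD (PySem.Dict.mk exame) "nome" ""
      (f.1 || (nome == "glicemia_jejum" || nome == "perfil_lipidico"),
       f.2.1 || nome == "cortisol",
       f.2.2 || PySem.Str.isIn "cultura" nome))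
    (false, false, false)
  let orientacoes : List String := []
  let orientacoes := if flags.1 then orientacoes ++ ["Jejum de 12 horas necessário"] else orientacoes
  let orientacoes := if flags.2.1 then orientacoes ++ ["Coleta preferencialmente entre 7h e 9h da manhã"] else orientacoes
  let orientacoes := if flags.2.2 then orientacoes ++ ["Evitar uso de antibióticos nas últimas 48h"] else orientacoes
  if orientacoes.isEmpty then ["Não há preparo especial necessário"] else orientacoes

-- ===== PRECONDITION & SPEC =====
def Spec_gerar_orientacoes_preparo_py (exames : List (List (String × String))) (out : List String) : Prop := out = gerar_orientacoes_preparo_py_alt exames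
instance (exames : List (List (String × String))) (out : List String) : Decidable (Spec_gerar_orientacoes_preparo_py exames out) := by unfold Spec_gerar_orientacoes_preparo_py; infer_instance

-- ===== CLAIM (what is proved, stated in full; the proofs are below) =====
def Claim_equal_gerar_orientacoes_preparo_py : Prop := ∀ (exames : List (List (String × String))), Dom_gerar_orientacoes_preparo_py exames → Spec_gerar_orientacoes_preparo_py exames (gerar_orientacoes_preparo_py exames)

-- ===== LEMMAS AND PROOFS =====

-- B's fold computes the disjunction of each per-exame predicate, or-ed onto the start flags.
theorem pv_fold_flags (exames : List (List (String × String))) (a b c : Bool) :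
    exames.foldl
      (fun (f : Bool × Bool × Bool) exame =>
        let nome := PySem.Dict.getD (PySem.Dict.mk exame) "nome" ""
        (f.1 || (nome == "glicemia_jejum" || nome == "perfil_lipidico"),
         f.2.1 || nome == "cortisol",
         f.2.2 || PySem.Str.isIn "cultura" nome))
      (a, b, c)
    = (a || exames.any (fun e => PySem.Dict.getD (PySem.Dict.mk e) "nome" "" == "glicemia_jejum"
                              || PySem.Dict.getD (PySem.Dict.mk e) "nome" "" == "perfil_lipidico"),
       b || exames.any (fun e => PySem.Dict.getD (PySem.Dict.mk e) "nome" "" == "cortisol"),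
       c || exames.any (fun e => PySem.Str.isIn "cultura" (PySem.Dict.getD (PySem.Dict.mk e) "nome" ""))) := by
  induction exames generalizing a b c with
  | nil => simp
  | cons h t ih =>
    simp only [List.foldl_cons, List.any_cons, ih]
    simp [Bool.or_assoc]

theorem pv_contains_eq_any (exames : List (List (String × String))) (s : String) :
    (exames.map (fun exame => PySem.Dict.getD (PySem.Dict.mk exame) "nome" "")).contains s
      = exames.any (fun e => PySem.Dict.getD (PySem.Dict.mk e) "nome" "" == s) := by
  induction exames with
  | nil => simp
  | cons h t ih =>
    simp only [List.map_cons, List.contains_cons, List.any_cons, ih]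
    congr 1
    exact Bool.beq_comm ..

theorem pv_any_or {α : Type} (l : List α) (p q : α → Bool) :
    (l.any fun a => p a || q a) = (l.any p || l.any q) := by
  induction l with
  | nil => simp
  | cons h t ih => simp only [List.any_cons, ih]; cases p h <;> cases q h <;> simp

-- ===== VERDICT (by name: the statement is the Claim_ definition above) =====
theorem gerar_orientacoes_preparo_py_spec : Claim_equal_gerar_orientacoes_preparo_py := by
  intro exames _
  show _ = _
  unfold gerar_orientacoes_preparo_py gerar_orientacoes_preparo_py_alt
  simp only [pv_fold_flags, Bool.false_or, List.any_cons, List.any_nil, Bool.or_false,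
    pv_contains_eq_any, List.any_map, Function.comp_def, ← pv_any_or]
  rcases hb1 : exames.any (fun e => PySem.Dict.getD (PySem.Dict.mk e) "nome" "" == "glicemia_jejum"
      || PySem.Dict.getD (PySem.Dict.mk e) "nome" "" == "perfil_lipidico") with _ | _ <;>
  rcases hb2 : exames.any (fun e => PySem.Dict.getD (PySem.Dict.mk e) "nome" "" == "cortisol") with _ | _ <;>
  rcases hb3 : exames.any (fun e => PySem.Str.isIn "cultura" (PySem.Dict.getD (PySem.Dict.mk e) "nome" "")) with _ | _ <;>
    simp [hb1, hb2, hb3, List.isEmpty]
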